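-- pv_equiv track=rewrite | github.com/omar-rayyan/Algorithim-Problems | equalStacks.py | equalStacks
-- ===== SOURCE A (Python) =====
-- def equalStacks(h1, h2, h3):
--     def cumulative_heights(heights):
--         cum_heights = []
--         total = 0
--         for h in reversed(heights):
--             total += h
--             cum_heights.append(total)
--         return set(cum_heights)
--     heights1 = cumulative_heights(h1)
--     heights2 = cumulative_heights(h2)
--     heights3 = cumulative_heights(h3)
--     common_heights = heights1.intersection(heights2).intersection(heights3)
--     return max(common_heights) if common_heights else 0
-- ===== SOURCE B (Python) =====
-- def equalStacks(h1, h2, h3):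
--     def desc_sums(heights):
--         total = 0
--         sums = []
--         for h in reversed(heights):
--             total += h
--             sums.append(total)
--         return sorted(set(sums), reverse=True)
--
--     a, b, c = desc_sums(h1), desc_sums(h2), desc_sums(h3)
--     i = j = k = 0
--     while i < len(a) and j < len(b) and k < len(c):
--         x, y, z = a[i], b[j], c[k]
--         if x == y == z:
--             return x
--         m = min(x, y, z)
--         if x > m:
--             i += 1
--         if y > m:
--             j += 1
--         if z > m:
--             k += 1
--     return 0
-- ===== Notes on version B (the rewrite author's own statement) =====
-- stated objective: alternative
-- what changed: Replaces hash-set intersection plus max() with sorting each deduplicated cumulative-sum list in descending order and running a three-pointer merge that advances past the largest heads until all three agree, returning the first (hence greatest) common value.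
import Mathlib
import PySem

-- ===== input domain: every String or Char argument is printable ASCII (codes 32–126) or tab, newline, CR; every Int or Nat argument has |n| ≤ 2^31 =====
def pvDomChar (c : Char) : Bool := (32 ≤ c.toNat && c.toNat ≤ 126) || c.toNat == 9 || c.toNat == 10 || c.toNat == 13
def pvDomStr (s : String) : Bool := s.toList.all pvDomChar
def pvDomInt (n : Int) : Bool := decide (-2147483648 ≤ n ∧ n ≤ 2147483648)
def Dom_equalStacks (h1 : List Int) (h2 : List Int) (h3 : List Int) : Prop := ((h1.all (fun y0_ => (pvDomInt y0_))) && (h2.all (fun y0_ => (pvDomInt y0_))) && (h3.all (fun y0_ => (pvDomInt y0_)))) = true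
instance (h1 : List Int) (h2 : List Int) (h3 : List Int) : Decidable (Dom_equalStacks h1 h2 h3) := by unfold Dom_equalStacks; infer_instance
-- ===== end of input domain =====

-- B replaces A's hash-set intersection + max() with sorted descending dedup lists and a
-- three-pointer merge (objective: alternative algorithm of similar cost).

-- ===== PORT A =====
-- the inner loop of cumulative_heights: append running totals of reversed(heights)
def cumulativeHeights (heights : List Int) : PySem.Set Int :=
  PySem.Set.ofList
    ((heights.reverse.foldl (fun (p : List Int × Int) h => (p.1 ++ [p.2 + h], p.2 + h)) ([], 0)).1)

def equalStacks (h1 : List Int) (h2 : List Int) (h3 : List Int) : Int :=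
  let heights1 := cumulativeHeights h1
  let heights2 := cumulativeHeights h2
  let heights3 := cumulativeHeights h3
  let common := PySem.Set.inter (PySem.Set.inter heights1 heights2) heights3
  match PySem.List.max? common (fun x => x) with
  | some m => m
  | none => 0

-- ===== PORT B =====
-- sorted(set(running suffix sums), reverse=True)
def descSums (heights : List Int) : List Int :=
  PySem.List.sorted
    (PySem.Set.ofList
      ((heights.reverse.foldl (fun (p : List Int × Int) h => (p.1 ++ [p.2 + h], p.2 + h)) ([], 0)).1))
    (fun x => x) true

-- the three-pointer while loop of Source B, as recursion on the unconsumed suffixes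
def merge3 : List Int → List Int → List Int → Int
  | x :: a, y :: b, z :: c =>
      if x = y ∧ y = z then x
      else
        let m := min x (min y z)
        merge3 (if m < x then a else x :: a) (if m < y then b else y :: b)
               (if m < z then c else z :: c)
  | _, _, _ => 0
  termination_by a b c => a.length + b.length + c.length
  decreasing_by
    simp only [m, min_def]
    split_ifs <;> first
      | omega
      | (simp only [List.length_cons]; omega)

def equalStacks_alt (h1 : List Int) (h2 : List Int) (h3 : List Int) : Int :=
  merge3 (descSums h1) (descSums h2) (descSums h3)

-- ===== PRECONDITION & SPEC =====
def Spec_equalStacks (h1 : List Int) (h2 : List Int) (h3 : List Int) (out : Int) : Prop := out = equalStacks_alt h1 h2 h3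
instance (h1 : List Int) (h2 : List Int) (h3 : List Int) (out : Int) : Decidable (Spec_equalStacks h1 h2 h3 out) := by unfold Spec_equalStacks; infer_instance

-- ===== CLAIM (what is proved, stated in full; the proofs are below) =====
def Claim_equal_equalStacks : Prop := ∀ (h1 : List Int) (h2 : List Int) (h3 : List Int), Dom_equalStacks h1 h2 h3 → Spec_equalStacks h1 h2 h3 (equalStacks h1 h2 h3)

-- ===== LEMMAS AND PROOFS =====

-- sorted descending with nodup is strictly decreasing
theorem descSums_pairwise (h : List Int) : (descSums h).Pairwise (fun a b => b < a) := by
  have hperm := PySem.List.sorted_perm (xs := PySem.Set.ofList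
      ((h.reverse.foldl (fun (p : List Int × Int) x => (p.1 ++ [p.2 + x], p.2 + x)) ([], 0)).1))
      (key := fun x => x) (rev := true)
  have hnd : (descSums h).Nodup := hperm.nodup_iff.mpr (PySem.Set.nodup_ofList _)
  have hle := PySem.List.sorted_pairwise_rev (xs := PySem.Set.ofList
      ((h.reverse.foldl (fun (p : List Int × Int) x => (p.1 ++ [p.2 + x], p.2 + x)) ([], 0)).1))
      (key := fun x => x)
  have := hle.and (List.Pairwise.imp (fun hne => hne) hnd)
  exact this.imp (fun ⟨hba, hne⟩ => lt_of_le_of_ne hba (fun e => hne e.symm))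

theorem descSums_mem (h : List Int) (v : Int) :
    v ∈ descSums h ↔ v ∈ cumulativeHeights h := by
  simp [descSums, cumulativeHeights, PySem.List.mem_sorted]

-- head of a strictly decreasing list bounds every member
theorem head_max {x : Int} {t : List Int} (hp : (x :: t).Pairwise (fun a b => b < a))
    {v : Int} (hv : v ∈ x :: t) : v ≤ x := by
  rcases hv with _ | hv
  · exact le_refl x
  · exact le_of_lt (List.rel_of_pairwise_cons hp (by assumption))

-- merge3 on strictly decreasing lists returns the greatest common element, or 0 if none
theorem merge3_none (a b c : List Int) :
    a.Pairwise (fun p q => q < p) → b.Pairwise (fun p q => q < p) →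
    c.Pairwise (fun p q => q < p) →
    (∀ v, v ∈ a → v ∈ b → v ∈ c → False) → merge3 a b c = 0 := by
  induction a, b, c using merge3.induct with
  | case1 x a y b z c heq =>
      intro _ _ _ h
      exact absurd (h x (by simp) (by simp [heq.1]) (by simp [heq.1, heq.2])) (by simp)
  | case2 x a y b z c hne m ih =>
      intro ha hb hc h
      rw [merge3, if_neg hne]
      try simp only [dite_eq_ite] at ih
      apply ih
      · split <;> [exact ha.sublist (List.sublist_cons_self _ _); exact ha]
      · split <;> [exact hb.sublist (List.sublist_cons_self _ _); exact hb]
      · split <;> [exact hc.sublist (List.sublist_cons_self _ _); exact hc]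
      · intro v hva hvb hvc
        apply h v
        · split at hva
          · exact List.mem_cons_of_mem _ hva
          · exact hva
        · split at hvb
          · exact List.mem_cons_of_mem _ hvb
          · exact hvb
        · split at hvc
          · exact List.mem_cons_of_mem _ hvc
          · exact hvc
  | case3 a b c hfa =>
      intro _ _ _ _
      rcases a with _ | ⟨x, a⟩ <;> rcases b with _ | ⟨y, b⟩ <;> rcases c with _ | ⟨z, c⟩ <;>
        first
          | exact absurd (hfa _ _ _ _ _ _ rfl rfl rfl) (by simp)
          | simp [merge3]

theorem merge3_max (a b c : List Int) (v : Int) :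
    a.Pairwise (fun p q => q < p) → b.Pairwise (fun p q => q < p) →
    c.Pairwise (fun p q => q < p) →
    v ∈ a → v ∈ b → v ∈ c →
    (∀ w, w ∈ a → w ∈ b → w ∈ c → w ≤ v) → merge3 a b c = v := by
  induction a, b, c using merge3.induct with
  | case1 x a y b z c heq =>
      intro ha _ _ hva _ _ hmax
      rw [merge3, if_pos heq]
      have hx : x ≤ v := hmax x (by simp) (by simp [heq.1]) (by simp [heq.1, heq.2])
      have hv : v ≤ x := head_max ha hva
      omega
  | case2 x a y b z c hne m ih =>
      intro ha hb hc hva hvb hvc hmax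
      -- v is not a dropped head: a dropped head exceeds the minimum of the three heads,
      -- hence is absent from the list whose head is that minimum
      have hmx : min x (min y z) = x ∨ min x (min y z) = y ∨ min x (min y z) = z := by omega
      have hnotbig : ¬ (min x (min y z) < v) := by
        intro hbig
        rcases hmx with hm | hm | hm
        · have := head_max ha hva; omega
        · have := head_max hb hvb; omega
        · have := head_max hc hvc; omega
      rw [merge3, if_neg hne]
      try simp only [dite_eq_ite] at ih
      apply ih
      · split <;> [exact ha.sublist (List.sublist_cons_self _ _); exact ha]
      · split <;> [exact hb.sublist (List.sublist_cons_self _ _); exact hb]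
      · split <;> [exact hc.sublist (List.sublist_cons_self _ _); exact hc]
      · split
        · rcases hva with _ | hva
          · omega
          · assumption
        · exact hva
      · split
        · rcases hvb with _ | hvb
          · omega
          · assumption
        · exact hvb
      · split
        · rcases hvc with _ | hvc
          · omega
          · assumption
        · exact hvc
      · intro w hwa hwb hwc
        apply hmax w
        · split at hwa
          · exact List.mem_cons_of_mem _ hwa
          · exact hwa
        · split at hwb
          · exact List.mem_cons_of_mem _ hwb
          · exact hwb
        · split at hwc
          · exact List.mem_cons_of_mem _ hwc
          · exact hwc
  | case3 a b c hfa =>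
      intro _ _ _ hva hvb hvc _
      rcases a with _ | ⟨x, a⟩ <;> rcases b with _ | ⟨y, b⟩ <;> rcases c with _ | ⟨z, c⟩ <;>
        first
          | exact absurd (hfa _ _ _ _ _ _ rfl rfl rfl) (by simp)
          | simp_all

-- ===== VERDICT (by name: the statement is the Claim_ definition above) =====
theorem equalStacks_spec : Claim_equal_equalStacks := by
  intro h1 h2 h3 _
  unfold Spec_equalStacks equalStacks_alt
  have hmemc : ∀ v : Int, v ∈ PySem.Set.inter (PySem.Set.inter (cumulativeHeights h1) (cumulativeHeights h2)) (cumulativeHeights h3) ↔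
      v ∈ descSums h1 ∧ v ∈ descSums h2 ∧ v ∈ descSums h3 := by
    intro v
    simp [PySem.Set.mem_inter, descSums_mem, and_assoc]
  show (match PySem.List.max? (PySem.Set.inter (PySem.Set.inter (cumulativeHeights h1) (cumulativeHeights h2)) (cumulativeHeights h3)) (fun x => x) with
    | some m => m
    | none => 0) = _
  cases hmax : PySem.List.max? (PySem.Set.inter (PySem.Set.inter (cumulativeHeights h1) (cumulativeHeights h2)) (cumulativeHeights h3)) (fun x => x) with
  | none =>
      have hnil := (PySem.List.max?_eq_none_iff (xs := _) (key := fun x : Int => x)).mp hmax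
      show (0 : Int) = _
      symm
      apply merge3_none _ _ _ (descSums_pairwise h1) (descSums_pairwise h2) (descSums_pairwise h3)
      intro v hva hvb hvc
      have : v ∈ ([] : List Int) := by
        rw [← hnil]; exact (hmemc v).mpr ⟨hva, hvb, hvc⟩
      simp at this
  | some m =>
      have hm := PySem.List.max?_mem hmax
      have hmx := PySem.List.max?_isMax hmax
      have hmem := (hmemc m).mp hm
      show m = _
      symm
      apply merge3_max _ _ _ m (descSums_pairwise h1) (descSums_pairwise h2) (descSums_pairwise h3)
        hmem.1 hmem.2.1 hmem.2.2
      intro w hwa hwb hwc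
      exact hmx w ((hmemc w).mpr ⟨hwa, hwb, hwc⟩)
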